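-- pv_equiv track=rewrite | github.com/zhangyang-crazy-one/openclaw | scripts/soul-reminder.py | extract_key_traits
-- ===== SOURCE A (Python) =====
-- def extract_key_traits(soul_content: str) -> dict:
--     """Extract key personality traits from SOUL.md."""
--     traits = {
--         "core_truths": [],
--         "boundaries": [],
--         "vibe": [],
--     }
--
--     lines = soul_content.split("\n")
--     current_section = None
--
--     for line in lines:
--         line = line.strip()
--         if line.startswith("##"):
--             current_section = line.lower().replace("## ", "").strip()
--         elif line.startswith("**") and line.endswith("**"):
--             trait = line.strip("*").strip()
--             if current_section == "core truths":
--                 traits["core_truths"].append(trait)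
--             elif current_section == "boundaries":
--                 traits["boundaries"].append(trait)
--             elif current_section == "vibe":
--                 traits["vibe"].append(trait)
--
--     return traits
-- ===== SOURCE B (Python) =====
-- def extract_key_traits(soul_content: str) -> dict:
--     """Extract key personality traits from SOUL.md (index-then-extract)."""
--     sections = {}
--     current = None
--     for raw in soul_content.split("\n"):
--         line = raw.strip()
--         if line.startswith("##"):
--             current = line.lower().replace("## ", "").strip()
--             sections.setdefault(current, [])
--         elif current is not None:
--             sections[current].append(line)
--
--     def pick(name):
--         return [l.strip("*").strip() for l in sections.get(name, [])
--                 if l.startswith("**") and l.endswith("**")]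
--
--     return {"core_truths": pick("core truths"),
--             "boundaries": pick("boundaries"),
--             "vibe": pick("vibe")}
-- ===== Notes on version B (the rewrite author's own statement) =====
-- stated objective: alternative
-- what changed: Replaced the fused state-carrying scan (which appends traits to three hard-coded lists as it walks the lines) by an index-then-extract decomposition: one pass groups stripped lines under their normalized '##' header in an ordered mapping, then a second pass extracts the '**'-bracketed traits for just the three target section names.
import Mathlib
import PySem

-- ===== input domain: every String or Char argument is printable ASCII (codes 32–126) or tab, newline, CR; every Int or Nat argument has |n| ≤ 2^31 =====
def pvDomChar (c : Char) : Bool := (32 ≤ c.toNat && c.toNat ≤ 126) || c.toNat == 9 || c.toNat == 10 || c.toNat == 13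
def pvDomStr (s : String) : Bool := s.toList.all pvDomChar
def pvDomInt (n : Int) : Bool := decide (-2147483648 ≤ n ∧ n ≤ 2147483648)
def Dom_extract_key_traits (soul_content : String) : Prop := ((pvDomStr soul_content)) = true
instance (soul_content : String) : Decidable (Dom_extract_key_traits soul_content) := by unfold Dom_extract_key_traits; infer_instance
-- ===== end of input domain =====

-- B replaces A's fused state-carrying scan by an index-then-extract decomposition:
-- pass 1 groups stripped lines under their normalized '##' header, pass 2 extracts traits.

-- ===== PORT A =====
-- loop body of A: state = (current_section, core_truths, boundaries, vibe)
def pvStepA (st : Option String × List String × List String × List String) (line : String) :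
    Option String × List String × List String × List String :=
  if PySem.Str.startswith (PySem.Str.strip line) "##" then
    (some (PySem.Str.strip (PySem.Str.replace (PySem.Str.lower (PySem.Str.strip line)) "## " "")),
     st.2.1, st.2.2.1, st.2.2.2)
  else if PySem.Str.startswith (PySem.Str.strip line) "**"
        && PySem.Str.endswith (PySem.Str.strip line) "**" then
    match st.1 with
    | some c =>
        if c = "core truths" then
          (st.1, st.2.1 ++ [PySem.Str.strip (PySem.Str.stripChars (PySem.Str.strip line) "*")], st.2.2.1, st.2.2.2)
        else if c = "boundaries" then
          (st.1, st.2.1, st.2.2.1 ++ [PySem.Str.strip (PySem.Str.stripChars (PySem.Str.strip line) "*")], st.2.2.2)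
        else if c = "vibe" then
          (st.1, st.2.1, st.2.2.1, st.2.2.2 ++ [PySem.Str.strip (PySem.Str.stripChars (PySem.Str.strip line) "*")])
        else st
    | none => st
  else st

def extract_key_traits (soul_content : String) : List (String × List String) :=
  let st := ((PySem.Str.split? soul_content "\n").getD []).foldl pvStepA (none, [], [], [])
  [("core_truths", st.2.1), ("boundaries", st.2.2.1), ("vibe", st.2.2.2)]

-- ===== PORT B =====
-- pass 1 loop body: state = (sections mapping, current header)
def pvStepB (st : PySem.Dict String (List String) × Option String) (line : String) :
    PySem.Dict String (List String) × Option String :=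
  if PySem.Str.startswith (PySem.Str.strip line) "##" then
    (st.1.setdefault (PySem.Str.strip (PySem.Str.replace (PySem.Str.lower (PySem.Str.strip line)) "## " "")) [],
     some (PySem.Str.strip (PySem.Str.replace (PySem.Str.lower (PySem.Str.strip line)) "## " "")))
  else
    match st.2 with
    | some c => (st.1.modify c [] (fun ls => ls ++ [PySem.Str.strip line]), st.2)
    | none => st

-- pass 2: the trait comprehension over one section's collected lines
def pvPick (sections : PySem.Dict String (List String)) (name : String) : List String :=
  ((sections.getD name []).filter
      (fun l => PySem.Str.startswith l "**" && PySem.Str.endswith l "**")).map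
    (fun l => PySem.Str.strip (PySem.Str.stripChars l "*"))

def extract_key_traits_alt (soul_content : String) : List (String × List String) :=
  let res := ((PySem.Str.split? soul_content "\n").getD []).foldl pvStepB (PySem.Dict.empty, none)
  [("core_truths", pvPick res.1 "core truths"),
   ("boundaries", pvPick res.1 "boundaries"),
   ("vibe", pvPick res.1 "vibe")]

-- ===== PRECONDITION & SPEC =====
def Spec_extract_key_traits (soul_content : String) (out : List (String × List String)) : Prop := out = extract_key_traits_alt soul_content
instance (soul_content : String) (out : List (String × List String)) : Decidable (Spec_extract_key_traits soul_content out) := by unfold Spec_extract_key_traits; infer_instance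

-- ===== CLAIM (what is proved, stated in full; the proofs are below) =====
def Claim_equal_extract_key_traits : Prop := ∀ (soul_content : String), Dom_extract_key_traits soul_content → Spec_extract_key_traits soul_content (extract_key_traits soul_content)

-- ===== LEMMAS AND PROOFS =====

-- A's view of B's pass-1 state
def pvView (st : PySem.Dict String (List String) × Option String) :
    Option String × List String × List String × List String :=
  (st.2, pvPick st.1 "core truths", pvPick st.1 "boundaries", pvPick st.1 "vibe")

lemma pvPick_setdefault (d : PySem.Dict String (List String)) (c name : String) :
    pvPick (d.setdefault c []) name = pvPick d name := by
  by_cases h : d.contains c = true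
  · rw [PySem.Dict.setdefault_of_contains d [] h]
  · rw [PySem.Dict.setdefault_of_not_contains d [] (by simpa using h)]
    unfold pvPick
    rw [PySem.Dict.getD_insert]
    by_cases he : name = c
    · rw [if_pos he, he, PySem.Dict.getD_of_not_contains d [] (by simpa using h)]
    · rw [if_neg he]

lemma pvPick_modify (d : PySem.Dict String (List String)) (c name l : String) :
    pvPick (d.modify c [] (fun ls => ls ++ [l])) name =
      pvPick d name ++
        (if name = c ∧ (PySem.Str.startswith l "**" && PySem.Str.endswith l "**") = true
         then [PySem.Str.strip (PySem.Str.stripChars l "*")] else []) := by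
  unfold pvPick
  rw [PySem.Dict.getD_modify]
  by_cases he : name = c
  · rw [if_pos he, he, List.filter_append, List.map_append]
    by_cases hp : (PySem.Str.startswith l "**" && PySem.Str.endswith l "**") = true
    · rw [if_pos ⟨rfl, hp⟩]
      simp only [List.filter_cons, List.filter_nil, hp, if_true, List.map_cons, List.map_nil]
    · rw [if_neg (fun h => hp h.2)]
      simp only [List.filter_cons, List.filter_nil, hp, Bool.false_eq_true, if_false, List.map_nil]
  · rw [if_neg he, if_neg (fun h => he h.1), List.append_nil]

lemma pvStep_sim (sec : PySem.Dict String (List String)) (cur : Option String) (line : String) :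
    pvView (pvStepB (sec, cur) line) = pvStepA (pvView (sec, cur)) line := by
  simp only [pvStepA, pvStepB, pvView]
  by_cases hh : PySem.Str.startswith (PySem.Str.strip line) "##" = true
  · rw [if_pos hh, if_pos hh, pvPick_setdefault, pvPick_setdefault, pvPick_setdefault]
  · rw [if_neg hh, if_neg hh]
    cases cur with
    | none =>
      dsimp only
      by_cases hp : (PySem.Str.startswith (PySem.Str.strip line) "**"
            && PySem.Str.endswith (PySem.Str.strip line) "**") = true
      · rw [if_pos hp]
      · rw [if_neg hp]
    | some c =>
      dsimp only
      by_cases hp : (PySem.Str.startswith (PySem.Str.strip line) "**"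
            && PySem.Str.endswith (PySem.Str.strip line) "**") = true
      · rw [if_pos hp, pvPick_modify, pvPick_modify, pvPick_modify]
        by_cases h1 : c = "core truths"
        · rw [if_pos h1, if_pos ⟨h1.symm, hp⟩,
              if_neg (fun h => absurd (h.1.trans h1) (by decide)),
              if_neg (fun h => absurd (h.1.trans h1) (by decide)),
              List.append_nil, List.append_nil]
        · by_cases h2 : c = "boundaries"
          · rw [if_neg h1, if_pos h2,
                if_neg (fun h => absurd (h.1.trans h2) (by decide)),
                if_pos ⟨h2.symm, hp⟩,
                if_neg (fun h => absurd (h.1.trans h2) (by decide)),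
                List.append_nil, List.append_nil]
          · by_cases h3 : c = "vibe"
            · rw [if_neg h1, if_neg h2, if_pos h3,
                  if_neg (fun h => absurd (h.1.trans h3) (by decide)),
                  if_neg (fun h => absurd (h.1.trans h3) (by decide)),
                  if_pos ⟨h3.symm, hp⟩,
                  List.append_nil, List.append_nil]
            · rw [if_neg h1, if_neg h2, if_neg h3,
                  if_neg (fun h => h1 h.1.symm), if_neg (fun h => h2 h.1.symm),
                  if_neg (fun h => h3 h.1.symm),
                  List.append_nil, List.append_nil, List.append_nil]
      · rw [if_neg hp, pvPick_modify, pvPick_modify, pvPick_modify,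
            if_neg (fun h => hp h.2), if_neg (fun h => hp h.2), if_neg (fun h => hp h.2),
            List.append_nil, List.append_nil, List.append_nil]

lemma pvFold_sim (lines : List String) (st : PySem.Dict String (List String) × Option String) :
    pvView (lines.foldl pvStepB st) = lines.foldl pvStepA (pvView st) := by
  induction lines generalizing st with
  | nil => rfl
  | cons x xs ih =>
    rw [List.foldl_cons, List.foldl_cons, ih, ← pvStep_sim st.1 st.2 x]

-- ===== VERDICT (by name: the statement is the Claim_ definition above) =====
theorem extract_key_traits_spec : Claim_equal_extract_key_traits := by
  intro s _
  unfold Spec_extract_key_traits extract_key_traits extract_key_traits_alt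
  have h := pvFold_sim ((PySem.Str.split? s "\n").getD []) (PySem.Dict.empty, none)
  have hinit : pvView (PySem.Dict.empty, none) = (none, [], [], []) := by
    simp [pvView, pvPick]
  rw [hinit] at h
  simp only [← h, pvView]
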